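-- pv_equiv track=rewrite | github.com/lilianvln/Hitman | SAT.py | varCivil
-- ===== SOURCE A (Python) =====
-- def var_civilN(N, M):
--     res = []
--     for i in range(N):
--         for j in range(M):
--             res.append(13 * (i * M + j) + 2)
--     return res
--
-- def var_civilE(N, M):
--     res = []
--     for i in range(N):
--         for j in range(M):
--             res.append(13 * (i * M + j) + 3)
--     return res
--
-- def var_civilS(N, M):
--     res = []
--     for i in range(N):
--         for j in range(M):
--             res.append(13 * (i * M + j) + 4)
--     return res
--
-- def var_civilW(N, M):
--     res = []
--     for i in range(N):
--         for j in range(M):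
--             res.append(13 * (i * M + j) + 5)
--     return res
--
-- def varCivil(N, M):
--     res = []
--     est = var_civilE(N, M)
--     nord = var_civilN(N, M)
--     sud = var_civilS(N, M)
--     ouest = var_civilW(N, M)
--     for i in range(N * M):
--         res.append(nord[i])
--         res.append(est[i])
--         res.append(sud[i])
--         res.append(ouest[i])
--     return res
-- ===== SOURCE B (Python) =====
-- def varCivil(N, M):
--     res = []
--     for k in range(N * M):
--         res.extend((13 * k + 2, 13 * k + 3, 13 * k + 4, 13 * k + 5))
--     return res
-- ===== Notes on version B (the rewrite author's own statement) =====
-- stated objective: simpler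
-- what changed: Replaced the four separate N*M double-loop direction lists plus an interleaving merge pass (five traversals, four temporary lists) by one single loop over k in range(N*M) that emits 13k+2..13k+5 directly.
import Mathlib
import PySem

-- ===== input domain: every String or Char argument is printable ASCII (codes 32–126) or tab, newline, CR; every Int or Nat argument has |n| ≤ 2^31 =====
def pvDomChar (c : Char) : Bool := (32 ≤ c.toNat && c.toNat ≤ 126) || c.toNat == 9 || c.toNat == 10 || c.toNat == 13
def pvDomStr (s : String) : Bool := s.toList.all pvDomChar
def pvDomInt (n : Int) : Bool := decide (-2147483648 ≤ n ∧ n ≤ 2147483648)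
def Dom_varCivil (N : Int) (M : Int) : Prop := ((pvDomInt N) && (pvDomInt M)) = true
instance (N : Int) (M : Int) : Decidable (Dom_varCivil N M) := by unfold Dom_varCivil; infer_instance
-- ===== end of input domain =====

-- One honest line: B replaces A's four separate N*M double-loop direction lists and the
-- interleaving merge pass by a single loop over range(N*M) emitting 13k+2..13k+5 directly (simpler).

-- ===== PORT A =====
-- the nested i/j loops of each helper; pyGetD with default 0 is total, Pre_ keeps the indexing in range
def var_civilN (N M : Int) : List Int :=
  (PySem.List.pyRange 0 N 1).foldl (fun res i =>
    (PySem.List.pyRange 0 M 1).foldl (fun res j => res ++ [13 * (i * M + j) + 2]) res) []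

def var_civilE (N M : Int) : List Int :=
  (PySem.List.pyRange 0 N 1).foldl (fun res i =>
    (PySem.List.pyRange 0 M 1).foldl (fun res j => res ++ [13 * (i * M + j) + 3]) res) []

def var_civilS (N M : Int) : List Int :=
  (PySem.List.pyRange 0 N 1).foldl (fun res i =>
    (PySem.List.pyRange 0 M 1).foldl (fun res j => res ++ [13 * (i * M + j) + 4]) res) []

def var_civilW (N M : Int) : List Int :=
  (PySem.List.pyRange 0 N 1).foldl (fun res i =>
    (PySem.List.pyRange 0 M 1).foldl (fun res j => res ++ [13 * (i * M + j) + 5]) res) []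

def varCivil (N : Int) (M : Int) : List Int :=
  let est := var_civilE N M
  let nord := var_civilN N M
  let sud := var_civilS N M
  let ouest := var_civilW N M
  (PySem.List.pyRange 0 (N * M) 1).foldl (fun res i =>
    res ++ [PySem.List.pyGetD nord i 0, PySem.List.pyGetD est i 0,
            PySem.List.pyGetD sud i 0, PySem.List.pyGetD ouest i 0]) []

-- ===== PORT B =====
def varCivil_alt (N : Int) (M : Int) : List Int :=
  (PySem.List.pyRange 0 (N * M) 1).foldl (fun res k =>
    res ++ [13 * k + 2, 13 * k + 3, 13 * k + 4, 13 * k + 5]) []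

-- ===== PRECONDITION & SPEC =====
-- Pre_ excludes exactly the inputs where A raises IndexError: N<0 and M<0 make the four
-- helper lists empty while range(N*M) is nonempty, so nord[i] raises.
def Pre_varCivil (N : Int) (M : Int) : Prop := 0 ≤ N ∨ 0 ≤ M
instance (N : Int) (M : Int) : Decidable (Pre_varCivil N M) := by unfold Pre_varCivil; infer_instance
def pvWitness_varCivil : Int × Int := (2, 3)

def Spec_varCivil (N : Int) (M : Int) (out : List Int) : Prop := out = varCivil_alt N M
instance (N : Int) (M : Int) (out : List Int) : Decidable (Spec_varCivil N M out) := by unfold Spec_varCivil; infer_instance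

-- ===== CLAIM (what is proved, stated in full; the proofs are below) =====
def Claim_equal_varCivil : Prop := ∀ (N : Int) (M : Int), Dom_varCivil N M → Pre_varCivil N M → Spec_varCivil N M (varCivil N M)

-- ===== LEMMAS AND PROOFS =====

-- the flattened range product: range n blocks of m consecutive indices
theorem flatMap_range_block {β : Type} (g : Nat → β) (n m : Nat) :
    (List.range n).flatMap (fun i => (List.range m).map (fun j => g (i * m + j)))
      = (List.range (n * m)).map g := by
  induction n with
  | zero => simp
  | succ n ih =>
    rw [List.range_succ, List.flatMap_append, ih, Nat.succ_mul, List.range_add,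
        List.map_append]
    simp [Function.comp, Nat.add_comm, List.map_map]

-- each helper list is the map of its formula over the flat range
theorem dir_eq_map (N M c : Int) (hN : 0 ≤ N) (hM : 0 ≤ M) :
    (PySem.List.pyRange 0 N 1).foldl (fun res i =>
      (PySem.List.pyRange 0 M 1).foldl (fun res j => res ++ [13 * (i * M + j) + c]) res) []
      = (PySem.List.pyRange 0 (N * M) 1).map (fun k => 13 * k + c) := by
  obtain ⟨n, rfl⟩ := Int.eq_ofNat_of_zero_le hN
  obtain ⟨m, rfl⟩ := Int.eq_ofNat_of_zero_le hM
  have hconv : ∀ acc : List Int, ∀ i : Int,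
      (PySem.List.pyRange 0 (m:Int) 1).foldl (fun res j => res ++ [13 * (i * (m:Int) + j) + c]) acc
        = acc ++ (PySem.List.pyRange 0 (m:Int) 1).map (fun j => 13 * (i * (m:Int) + j) + c) := by
    intro acc i; exact PySem.List.foldl_append_singleton_eq_map _ _ _
  rw [PySem.List.foldl_congr_mem _ _
        (fun res i => res ++ (PySem.List.pyRange 0 (m:Int) 1).map (fun j => 13 * (i * (m:Int) + j) + c)) _
        (fun acc i _ => hconv acc i),
      PySem.List.foldl_append_eq_flatMap]
  rw [show ((n:Int) * (m:Int)) = ((n*m : Nat) : Int) by push_cast; ring]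
  rw [PySem.List.pyRange_zero_natCast, PySem.List.pyRange_zero_natCast, PySem.List.pyRange_zero_natCast]
  simp only [List.nil_append, List.flatMap_map, List.map_map, Function.comp_def]
  rw [← flatMap_range_block (fun k => 13 * (k:Int) + c) n m]
  apply List.flatMap_congr
  intro i _
  apply List.map_congr_left
  intro j _
  push_cast; ring

-- ===== VERDICT (by name: the statement is the Claim_ definition above) =====
theorem varCivil_spec : Claim_equal_varCivil := by
  intro N M _ hpre
  unfold Spec_varCivil varCivil varCivil_alt
  by_cases hN : 0 ≤ N
  · by_cases hM : 0 ≤ M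
    · -- main case: all four lists are maps over range(N*M); index lookups hit the formula
      simp only [var_civilN, var_civilE, var_civilS, var_civilW,
        dir_eq_map N M 2 hN hM, dir_eq_map N M 3 hN hM, dir_eq_map N M 4 hN hM,
        dir_eq_map N M 5 hN hM]
      apply PySem.List.foldl_congr_mem
      intro acc i hi
      rw [PySem.List.mem_pyRange_one] at hi
      rw [PySem.List.pyGetD_map_pyRange_of_nonneg _ _ _ _ hi.1 hi.2,
          PySem.List.pyGetD_map_pyRange_of_nonneg _ _ _ _ hi.1 hi.2,
          PySem.List.pyGetD_map_pyRange_of_nonneg _ _ _ _ hi.1 hi.2,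
          PySem.List.pyGetD_map_pyRange_of_nonneg _ _ _ _ hi.1 hi.2]
    · -- N ≥ 0, M < 0: N*M ≤ 0, both main loops are empty
      have : PySem.List.pyRange 0 (N * M) 1 = [] := by
        apply List.eq_nil_iff_forall_not_mem.mpr
        intro x hx; rw [PySem.List.mem_pyRange_one] at hx
        have : N * M ≤ 0 := Int.mul_nonpos_of_nonneg_of_nonpos hN (by omega)
        omega
      simp [this]
  · -- N < 0, so 0 ≤ M by Pre_: N*M ≤ 0, both main loops are empty
    have hM : 0 ≤ M := hpre.resolve_left hN
    have : PySem.List.pyRange 0 (N * M) 1 = [] := by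
      apply List.eq_nil_iff_forall_not_mem.mpr
      intro x hx; rw [PySem.List.mem_pyRange_one] at hx
      have : N * M ≤ 0 := Int.mul_nonpos_of_nonpos_of_nonneg (by omega) hM
      omega
    simp [this]
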